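-- pv_equiv track=rewrite | github.com/VamsiSudhakaran1/release-gate | tests/test_release_gate.py | determine_decision
-- ===== SOURCE A (Python) =====
-- def determine_decision(results, policy=None):
--     """
--     Determine final decision based on check results and policy.
--
--     Policy defines what's critical (FAIL) vs flexible (WARN).
--     """
--     if policy is None:
--         policy = {}
--
--     fail_on = set(policy.get('fail_on', []))
--     warn_on = set(policy.get('warn_on', []))
--
--     # Check 1: Any FAIL in fail_on list = FAIL decision
--     for check_name, result in results.items():
--         if result.get('status') == 'FAIL' and check_name in fail_on:
--             return 'FAIL'
--
--     # Check 2: Any FAIL (even if not in fail_on) = FAIL by default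
--     for check_name, result in results.items():
--         if result.get('status') == 'FAIL' and check_name not in warn_on:
--             return 'FAIL'
--
--     # Check 3: Any WARN in warn_on list = WARN decision
--     for check_name, result in results.items():
--         if result.get('status') in ['WARN', 'FAIL'] and check_name in warn_on:
--             return 'WARN'
--
--     # Check 4: Default behavior (no policy) - fail if anything failed
--     if any(r.get('status') == 'FAIL' for r in results.values()):
--         return 'FAIL'
--
--     # Check 5: Warn if anything warned
--     if any(r.get('status') == 'WARN' for r in results.values()):
--         return 'WARN'
--
--     return 'PASS'
-- ===== SOURCE B (Python) =====
-- def determine_decision(results, policy=None):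
--     """Single pass over results accumulating five flags, then one priority chain."""
--     if policy is None:
--         policy = {}
--     fail_on = set(policy.get('fail_on', []))
--     warn_on = set(policy.get('warn_on', []))
--     fail_in_failon = False
--     fail_not_warnon = False
--     warnfail_in_warnon = False
--     any_fail = False
--     any_warn = False
--     for name, result in results.items():
--         status = result.get('status')
--         if status == 'FAIL':
--             any_fail = True
--             if name in fail_on:
--                 fail_in_failon = True
--             if name in warn_on:
--                 warnfail_in_warnon = True
--             else:
--                 fail_not_warnon = True
--         elif status == 'WARN':
--             any_warn = True
--             if name in warn_on:
--                 warnfail_in_warnon = True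
--     if fail_in_failon or fail_not_warnon:
--         return 'FAIL'
--     if warnfail_in_warnon:
--         return 'WARN'
--     if any_fail:
--         return 'FAIL'
--     if any_warn:
--         return 'WARN'
--     return 'PASS'
-- ===== Notes on version B (the rewrite author's own statement) =====
-- stated objective: alternative
-- what changed: Replaces A's five separate scans over results (three early-return loops plus two any() passes) with a single loop that accumulates five boolean flags, followed by one priority if-chain in A's return order.
import Mathlib
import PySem

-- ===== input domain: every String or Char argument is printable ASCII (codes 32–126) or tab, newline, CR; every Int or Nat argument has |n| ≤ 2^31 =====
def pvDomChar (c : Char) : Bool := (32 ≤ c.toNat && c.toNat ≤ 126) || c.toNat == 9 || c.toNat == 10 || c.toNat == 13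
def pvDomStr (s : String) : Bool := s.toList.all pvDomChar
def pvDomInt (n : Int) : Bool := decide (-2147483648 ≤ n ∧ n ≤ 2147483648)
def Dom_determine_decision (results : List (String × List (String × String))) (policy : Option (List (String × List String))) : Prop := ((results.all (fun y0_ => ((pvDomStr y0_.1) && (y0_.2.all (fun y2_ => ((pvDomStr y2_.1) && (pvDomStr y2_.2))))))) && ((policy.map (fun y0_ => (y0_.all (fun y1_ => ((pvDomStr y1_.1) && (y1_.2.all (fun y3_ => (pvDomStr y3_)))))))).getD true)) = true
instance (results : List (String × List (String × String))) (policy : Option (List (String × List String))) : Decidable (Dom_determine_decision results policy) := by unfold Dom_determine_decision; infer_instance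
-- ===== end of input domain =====

-- B replaces A's five separate scans over results with ONE accumulating pass plus a
-- priority if-chain in A's return order (objective: alternative single-pass decomposition).

-- ===== PORT A =====
-- A: five sequential scans, each returning on the first hit (a loop that returns a
-- constant on the first matching element = List.any of that element condition).
def determine_decision (results : List (String × List (String × String))) (policy : Option (List (String × List String))) : String :=
  let pol := policy.getD []            -- if policy is None: policy = {}
  let fail_on := PySem.Set.ofList (PySem.Dict.getD (PySem.Dict.mk pol) "fail_on" [])
  let warn_on := PySem.Set.ofList (PySem.Dict.getD (PySem.Dict.mk pol) "warn_on" [])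
  if results.any (fun x => PySem.Dict.get? (PySem.Dict.mk x.2) "status" == some "FAIL" && PySem.Set.contains fail_on x.1) then "FAIL"
  else if results.any (fun x => PySem.Dict.get? (PySem.Dict.mk x.2) "status" == some "FAIL" && !(PySem.Set.contains warn_on x.1)) then "FAIL"
  else if results.any (fun x => (PySem.Dict.get? (PySem.Dict.mk x.2) "status" == some "WARN" || PySem.Dict.get? (PySem.Dict.mk x.2) "status" == some "FAIL") && PySem.Set.contains warn_on x.1) then "WARN"
  else if results.any (fun x => PySem.Dict.get? (PySem.Dict.mk x.2) "status" == some "FAIL") then "FAIL"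
  else if results.any (fun x => PySem.Dict.get? (PySem.Dict.mk x.2) "status" == some "WARN") then "WARN"
  else "PASS"

-- ===== PORT B =====
-- the five flags of Source B's single loop
structure Flags where
  ff  : Bool  -- fail_in_failon
  fnw : Bool  -- fail_not_warnon
  wfw : Bool  -- warnfail_in_warnon
  af  : Bool  -- any_fail
  aw  : Bool  -- any_warn
deriving DecidableEq, Repr

-- one iteration of Source B's loop body
def altStep (fail_on warn_on : PySem.Set String) (s : Flags) (x : String × List (String × String)) : Flags :=
  let st := PySem.Dict.get? (PySem.Dict.mk x.2) "status"
  if st == some "FAIL" then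
    { s with af := true,
             ff := if PySem.Set.contains fail_on x.1 then true else s.ff,
             wfw := if PySem.Set.contains warn_on x.1 then true else s.wfw,
             fnw := if PySem.Set.contains warn_on x.1 then s.fnw else true }
  else if st == some "WARN" then
    { s with aw := true,
             wfw := if PySem.Set.contains warn_on x.1 then true else s.wfw }
  else s

def determine_decision_alt (results : List (String × List (String × String))) (policy : Option (List (String × List String))) : String :=
  let pol := policy.getD []
  let fail_on := PySem.Set.ofList (PySem.Dict.getD (PySem.Dict.mk pol) "fail_on" [])
  let warn_on := PySem.Set.ofList (PySem.Dict.getD (PySem.Dict.mk pol) "warn_on" [])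
  let f := results.foldl (altStep fail_on warn_on) ⟨false, false, false, false, false⟩
  if f.ff || f.fnw then "FAIL"
  else if f.wfw then "WARN"
  else if f.af then "FAIL"
  else if f.aw then "WARN"
  else "PASS"

-- ===== PRECONDITION & SPEC =====
def Spec_determine_decision (results : List (String × List (String × String))) (policy : Option (List (String × List String))) (out : String) : Prop := out = determine_decision_alt results policy
instance (results : List (String × List (String × String))) (policy : Option (List (String × List String))) (out : String) : Decidable (Spec_determine_decision results policy out) := by unfold Spec_determine_decision; infer_instance

-- ===== CLAIM (what is proved, stated in full; the proofs are below) =====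
def Claim_equal_determine_decision : Prop := ∀ (results : List (String × List (String × String))) (policy : Option (List (String × List String))), Dom_determine_decision results policy → Spec_determine_decision results policy (determine_decision results policy)

-- ===== LEMMAS AND PROOFS =====

-- the folded flags are exactly the five List.any's of A's element conditions
theorem foldl_altStep (fo wo : PySem.Set String) (l : List (String × List (String × String))) (s : Flags) :
    l.foldl (altStep fo wo) s =
      ⟨s.ff  || l.any (fun x => PySem.Dict.get? (PySem.Dict.mk x.2) "status" == some "FAIL" && PySem.Set.contains fo x.1),
       s.fnw || l.any (fun x => PySem.Dict.get? (PySem.Dict.mk x.2) "status" == some "FAIL" && !(PySem.Set.contains wo x.1)),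
       s.wfw || l.any (fun x => (PySem.Dict.get? (PySem.Dict.mk x.2) "status" == some "WARN" || PySem.Dict.get? (PySem.Dict.mk x.2) "status" == some "FAIL") && PySem.Set.contains wo x.1),
       s.af  || l.any (fun x => PySem.Dict.get? (PySem.Dict.mk x.2) "status" == some "FAIL"),
       s.aw  || l.any (fun x => PySem.Dict.get? (PySem.Dict.mk x.2) "status" == some "WARN")⟩ := by
  induction l generalizing s with
  | nil => simp
  | cons x l ih =>
    rw [List.foldl_cons, ih]
    by_cases hF : PySem.Dict.get? (PySem.Dict.mk x.2) "status" = some "FAIL"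
    · by_cases hw : PySem.Set.contains wo x.1 = true <;>
        by_cases hc : PySem.Set.contains fo x.1 = true <;>
        simp [altStep, hF, Bool.or_assoc, Bool.or_left_comm]
    · by_cases hW : PySem.Dict.get? (PySem.Dict.mk x.2) "status" = some "WARN"
      · by_cases hw : PySem.Set.contains wo x.1 = true <;>
          simp [altStep, hW, Bool.or_assoc, Bool.or_left_comm]
      · have hF' : (PySem.Dict.get? (PySem.Dict.mk x.2) "status" == some "FAIL") = false := by
          simp only [beq_eq_false_iff_ne, ne_eq]; exact hF
        have hW' : (PySem.Dict.get? (PySem.Dict.mk x.2) "status" == some "WARN") = false := by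
          simp only [beq_eq_false_iff_ne, ne_eq]; exact hW
        simp [altStep, hF', hW']

-- the two FAIL-returning checks of A collapse to B's single disjunction
theorem chain_eq (a1 a2 a3 a4 a5 : Bool) :
    (if a1 then "FAIL" else if a2 then "FAIL" else if a3 then "WARN"
     else if a4 then "FAIL" else if a5 then "WARN" else "PASS")
      = (if a1 || a2 then "FAIL" else if a3 then "WARN"
         else if a4 then "FAIL" else if a5 then "WARN" else "PASS") := by
  cases a1 <;> cases a2 <;> simp

-- ===== VERDICT (by name: the statement is the Claim_ definition above) =====
theorem determine_decision_spec : Claim_equal_determine_decision := by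
  intro results policy _
  unfold Spec_determine_decision determine_decision determine_decision_alt
  simp only [foldl_altStep]
  exact chain_eq _ _ _ _ _
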